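-- pv_equiv track=rewrite | github.com/scottyler89/guide_pmd_std_res | guide_pmd/contrasts.py | _replace_backticked_names
-- ===== SOURCE A (Python) =====
-- def _replace_backticked_names(expr: str) -> tuple[str, dict[str, str]]:
--     """
--     Replace `...` substrings with safe identifiers so we can parse with `ast`.
--
--     Returns:
--       - transformed expression
--       - placeholder -> original column name mapping
--     """
--     out: list[str] = []
--     mapping: dict[str, str] = {}
--     i = 0
--     counter = 0
--     while i < len(expr):
--         if expr[i] != "`":
--             out.append(expr[i])
--             i += 1
--             continue
--         j = expr.find("`", i + 1)
--         if j == -1: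
--             raise ValueError("unclosed backtick in contrast expression")
--         name = expr[i + 1 : j]
--         if name == "":
--             raise ValueError("empty backticked name in contrast expression")
--         placeholder = f"__c{counter}__"
--         counter += 1
--         mapping[placeholder] = name
--         out.append(placeholder)
--         i = j + 1
--     return "".join(out), mapping
-- ===== SOURCE B (Python) =====
-- def _replace_backticked_names(expr: str) -> tuple[str, dict[str, str]]:
--     """Split once on backticks; odd-numbered parts are the quoted names."""
--     parts = expr.split("`")
--     if len(parts) % 2 == 0:
--         raise ValueError("unclosed backtick in contrast expression")
--     it = iter(parts)
--     pieces = [next(it)]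
--     mapping = {}
--     n = 0
--     for name in it:
--         tail = next(it)
--         if name == "":
--             raise ValueError("empty backticked name in contrast expression")
--         ph = "__c%d__" % n
--         mapping[ph] = name
--         n += 1
--         pieces.append(ph)
--         pieces.append(tail)
--     return "".join(pieces), mapping
-- ===== Notes on version B (the rewrite author's own statement) =====
-- stated objective: simpler
-- what changed: A scans the string character by character in Python, calling str.find for each closing backtick and slicing names out by index; B splits the string once on the backtick character (odd-numbered parts are exactly the backticked names) and assembles the result in one loop over the parts, two parts per step, so the per-character Python loop is replaced by a single C-level str.split (measured faster in a timing run).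
-- outside the precondition, e.g. on _replace_backticked_names('`'): A raises ValueError, B raises ValueError
import Mathlib
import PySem

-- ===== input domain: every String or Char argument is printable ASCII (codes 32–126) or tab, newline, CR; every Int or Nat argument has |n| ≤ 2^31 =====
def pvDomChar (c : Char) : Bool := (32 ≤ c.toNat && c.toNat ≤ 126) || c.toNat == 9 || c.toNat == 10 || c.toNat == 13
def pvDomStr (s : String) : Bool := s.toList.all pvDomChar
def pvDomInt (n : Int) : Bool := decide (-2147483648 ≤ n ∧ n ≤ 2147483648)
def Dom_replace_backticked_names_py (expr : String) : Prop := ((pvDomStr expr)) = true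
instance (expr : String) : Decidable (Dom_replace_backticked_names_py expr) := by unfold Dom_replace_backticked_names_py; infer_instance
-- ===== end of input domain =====

-- B rewrites A's char-by-char scan (with str.find for each closing backtick) as a single
-- split on "`" followed by one loop over the parts two at a time (objective: simpler).

-- ===== PORT A =====
-- A's while-loop over `expr`, transcribed as recursion on the remaining suffix `cs`
-- (so `expr.find("`", i + 1)` becomes a find on the suffix after the opening backtick);
-- `none` = the two `raise ValueError` exits.
def pvGoA (cs : List Char) (out : List String) (mapping : PySem.Dict String String)
    (counter : Int) : Option (String × List (String × String)) :=
  match cs with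
  | [] => some (PySem.Str.join "" out, mapping.items)
  | c :: rest =>
    if c ≠ '`' then
      pvGoA rest (out ++ [String.ofList [c]]) mapping counter
    else
      let j : Int := PySem.Chars.find rest ['`']    -- j = expr.find("`", i + 1), relative to rest
      if j = -1 then none                           -- raise ValueError (unclosed backtick)
      else
        let name := rest.take j.toNat               -- expr[i + 1 : j]
        if name = [] then none                      -- raise ValueError (empty backticked name)
        else
          let ph := "__c" ++ PySem.Int.toStr counter ++ "__"
          pvGoA (rest.drop (j.toNat + 1)) (out ++ [ph])
            (mapping.insert ph (String.ofList name)) (counter + 1)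
termination_by cs.length
decreasing_by
  all_goals simp [List.length_drop]

def replace_backticked_names_py (expr : String) : String × (List (String × String)) :=
  (pvGoA expr.toList [] PySem.Dict.empty 0).getD ("", [])

-- ===== PORT B =====
-- B's for-loop over the iterator of parts, pulling two parts (name, tail) per step;
-- `none` = the `raise ValueError` (empty name) / `next(it)` on an exhausted iterator
-- (the latter is unreachable: after the length check the list of remaining parts is even).
def pvLoop (rest : List String) (pieces : List String) (mapping : PySem.Dict String String)
    (n : Int) : Option (List String × PySem.Dict String String) :=
  match rest with
  | [] => some (pieces, mapping)
  | [_] => none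
  | name :: tail :: rest' =>
    if name = "" then none                          -- raise ValueError (empty backticked name)
    else
      let ph := "__c" ++ PySem.Int.toStr n ++ "__"
      pvLoop rest' (pieces ++ [ph, tail]) (mapping.insert ph name) (n + 1)

def replace_backticked_names_py_alt (expr : String) : String × (List (String × String)) :=
  -- expr.split("`"): PySem.Chars.splitOn is the sep ≠ "" form of str.split
  let parts := (PySem.Chars.splitOn expr.toList ['`']).map String.ofList
  if parts.length % 2 == 0 then ("", [])            -- raise ValueError (unclosed backtick)
  else
    match pvLoop parts.tail [parts.headD ""] PySem.Dict.empty 0 with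
    | none => ("", [])
    | some (pieces, mapping) => (PySem.Str.join "" pieces, mapping.items)

-- ===== PRECONDITION & SPEC =====
-- Pre_ = exactly the inputs where Python A returns: an even number of backticks (the parts
-- list of expr.split("`") has odd length) and no empty backticked name (every odd-indexed part
-- is nonempty); outside it both Pythons raise ValueError.
def Pre_replace_backticked_names_py (expr : String) : Prop :=
  (PySem.Chars.splitOn expr.toList ['`']).length % 2 = 1 ∧
  ∀ pr ∈ PySem.List.enumerate (PySem.Chars.splitOn expr.toList ['`']) 0,
      pr.1 % 2 = 1 → pr.2 ≠ []
instance (expr : String) : Decidable (Pre_replace_backticked_names_py expr) := by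
  unfold Pre_replace_backticked_names_py; infer_instance

def pvWitness_replace_backticked_names_py : String := "`a` + `b c`"

def Spec_replace_backticked_names_py (expr : String) (out : String × (List (String × String))) : Prop := out = replace_backticked_names_py_alt expr
instance (expr : String) (out : String × (List (String × String))) : Decidable (Spec_replace_backticked_names_py expr out) := by unfold Spec_replace_backticked_names_py; infer_instance

-- ===== CLAIM (what is proved, stated in full; the proofs are below) =====
def Claim_equal_replace_backticked_names_py : Prop := ∀ (expr : String), Dom_replace_backticked_names_py expr → Pre_replace_backticked_names_py expr → Spec_replace_backticked_names_py expr (replace_backticked_names_py expr)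

-- ===== LEMMAS AND PROOFS =====

-- A structural model of expr.split("`") on the char list.
def pvSplit : List Char → List (List Char)
  | [] => [[]]
  | c :: rest =>
    if c = '`' then [] :: pvSplit rest
    else
      match pvSplit rest with
      | [] => [[c]]
      | h :: t => (c :: h) :: t

def pvConsHead (p : List Char) : List (List Char) → List (List Char)
  | [] => [p]
  | h :: t => (p ++ h) :: t

theorem pvSplit_ne_nil (cs : List Char) : pvSplit cs ≠ [] := by
  cases cs with
  | nil => simp [pvSplit]
  | cons c rest =>
    simp only [pvSplit]
    split
    · simp
    · split <;> simp

theorem pvSplitOn_go (l : List Char) : ∀ (fuel : Nat) (cur : List Char) (acc : List (List Char)),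
    l.length ≤ fuel →
    PySem.Chars.splitOn.go ['`'] fuel l cur acc = acc.reverse ++ pvConsHead cur.reverse (pvSplit l) := by
  induction l with
  | nil =>
    intro fuel cur acc _
    cases fuel <;> simp [PySem.Chars.splitOn.go, pvSplit, pvConsHead]
  | cons c rest ih =>
    intro fuel cur acc hle
    cases fuel with
    | zero => simp at hle
    | succ f =>
      by_cases hc : c = '`'
      · subst hc
        rw [show PySem.Chars.splitOn.go ['`'] (f + 1) ('`' :: rest) cur acc
              = PySem.Chars.splitOn.go ['`'] f rest [] (cur.reverse :: acc) by
            simp [PySem.Chars.splitOn.go, List.isPrefixOf]]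
        rw [ih f [] (cur.reverse :: acc) (by simp at hle; omega)]
        rcases h : pvSplit rest with _ | ⟨hd, tl⟩
        · exact absurd h (pvSplit_ne_nil rest)
        · simp [pvSplit, pvConsHead, h]
      · have hc' : ('`' == c) = false := by simp [Ne.symm hc]
        rw [show PySem.Chars.splitOn.go ['`'] (f + 1) (c :: rest) cur acc
              = PySem.Chars.splitOn.go ['`'] f rest (c :: cur) acc by
            simp [PySem.Chars.splitOn.go, List.isPrefixOf, hc']]
        rw [ih f (c :: cur) acc (by simp at hle; omega)]
        rcases h : pvSplit rest with _ | ⟨hd, tl⟩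
        · exact absurd h (pvSplit_ne_nil rest)
        · simp [pvSplit, pvConsHead, h, hc]

theorem pvSplitOn_eq (cs : List Char) : PySem.Chars.splitOn cs ['`'] = pvSplit cs := by
  rw [show PySem.Chars.splitOn cs ['`'] = PySem.Chars.splitOn.go ['`'] (cs.length + 1) cs [] []
        from rfl]
  rw [pvSplitOn_go cs (cs.length + 1) [] [] (by omega)]
  rcases h : pvSplit cs with _ | ⟨hd, tl⟩
  · exact absurd h (pvSplit_ne_nil cs)
  · simp [pvConsHead]

theorem pvSplit_no_tick (s : List Char) (h : '`' ∉ s) : pvSplit s = [s] := by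
  induction s with
  | nil => rfl
  | cons c rest ih =>
    simp only [List.mem_cons, not_or] at h
    rw [pvSplit, if_neg (fun hh => h.1 hh.symm), ih h.2]

theorem pvSplit_append_tick (name rest2 : List Char) (h : '`' ∉ name) :
    pvSplit (name ++ '`' :: rest2) = name :: pvSplit rest2 := by
  induction name with
  | nil => simp [pvSplit]
  | cons c nm ih =>
    simp only [List.mem_cons, not_or] at h
    rw [List.cons_append, pvSplit, if_neg (fun hh => h.1 hh.symm), ih h.2]

theorem pvDropWhile_head (l : List Char) (d : Char) (t : List Char)
    (h : l.dropWhile (fun x => x ≠ '`') = d :: t) : d = '`' := by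
  induction l with
  | nil => simp at h
  | cons c r ih =>
    rw [List.dropWhile_cons] at h
    by_cases hc : c = '`'
    · rw [if_neg (by simp [hc])] at h
      injection h with h1 _
      rw [← h1, hc]
    · rw [if_pos (by simp [hc])] at h
      exact ih h

-- [c] is a prefix iff the head is c
theorem pvSingleton_prefix (c : Char) (l : List Char) : [c] <+: l ↔ l.head? = some c := by
  cases l with
  | nil => simp
  | cons x xs => simp [List.cons_prefix_cons, eq_comm]

-- s.find("`") when the string is name ++ "`" ++ rest2 with name backtick-free
theorem pvFind_char (name rest2 : List Char) (h : '`' ∉ name) :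
    PySem.Chars.find (name ++ '`' :: rest2) ['`'] = (name.length : Int) := by
  set s := name ++ '`' :: rest2 with hs
  have hmem : ('`' : Char) ∈ s := by simp [hs]
  have hinf : ['`'] <:+: s := by
    obtain ⟨p, q, hpq⟩ := List.append_of_mem hmem
    exact ⟨p, q, by simp [hpq]⟩
  have h0 : 0 ≤ PySem.Chars.find s ['`'] := (PySem.Chars.find_nonneg_iff s ['`']).2 hinf
  obtain ⟨hpre, hmin⟩ := PySem.Chars.find_spec h0
  set j := (PySem.Chars.find s ['`']).toNat with hj
  have hj1 : s[j]? = some '`' := by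
    rw [← List.head?_drop]; exact (pvSingleton_prefix _ _).1 hpre
  have hnamej : s[name.length]? = some '`' := by
    simp [hs]
  have hle : j ≤ name.length := by
    by_contra hlt
    have := hmin name.length (by omega)
    rw [pvSingleton_prefix, List.head?_drop] at this
    exact this hnamej
  have hge : name.length ≤ j := by
    by_contra hlt
    rw [Nat.not_le] at hlt
    have heq : s[j]? = name[j]? := by
      rw [hs]; exact List.getElem?_append_left hlt
    rw [heq] at hj1
    exact h (List.mem_of_getElem? hj1)
  have : j = name.length := by omega
  omega

theorem pvFind_no_tick (rest : List Char) (h : '`' ∉ rest) :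
    PySem.Chars.find rest ['`'] = -1 := by
  rw [PySem.Chars.find_eq_neg_one_iff]
  intro hinf
  exact h (hinf.mem (by simp))

-- "".join at the char level
theorem pvJoin_flat (l : List String) :
    PySem.Str.join "" l = String.ofList (l.map String.toList).flatten := by
  have key : ∀ xs : List (List Char), PySem.Chars.join [] xs = xs.flatten := by
    intro xs
    induction xs with
    | nil => simp [PySem.Chars.join_nil]
    | cons a r ih =>
      cases r with
      | nil => simp [PySem.Chars.join_singleton]
      | cons b r' =>
        rw [PySem.Chars.join_cons_cons, ih]
        simp
  simp [PySem.Str.join, key]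

-- pvLoop only ever appends to `pieces`
theorem pvLoop_append : ∀ (rest : List String) (p q : List String)
    (m : PySem.Dict String String) (n : Int),
    pvLoop rest (p ++ q) m n = (pvLoop rest q m n).map (fun pr => (p ++ pr.1, pr.2))
  | [], p, q, m, n => by simp [pvLoop]
  | [x], p, q, m, n => by simp [pvLoop]
  | name :: tail :: r, p, q, m, n => by
    by_cases h : name = ""
    · simp [pvLoop, h]
    · simp only [pvLoop, if_neg h]
      rw [show (p ++ q) ++ ["__c" ++ PySem.Int.toStr n ++ "__", tail]
            = p ++ (q ++ ["__c" ++ PySem.Int.toStr n ++ "__", tail]) by simp]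
      exact pvLoop_append r p _ (m.insert ("__c" ++ PySem.Int.toStr n ++ "__") name) (n + 1)

theorem pvOfList_eq_empty_iff (l : List Char) : String.ofList l = "" ↔ l = [] := by
  constructor
  · intro h
    have := congrArg String.toList h
    simpa using this
  · intro h; simp [h]

-- The heart of the file: A's scan equals B's loop over the split parts.
theorem pvMainAux : ∀ (N : Nat) (cs : List Char), cs.length ≤ N →
    ∀ (out : List String) (m : PySem.Dict String String) (k : Int),
    pvGoA cs out m k =
      (pvLoop ((pvSplit cs).tail.map String.ofList)
          (out ++ [String.ofList ((pvSplit cs).headD [])]) m k).map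
        (fun pr => (PySem.Str.join "" pr.1, pr.2.items)) := by
  intro N
  induction N with
  | zero =>
    intro cs hlen out m k
    have : cs = [] := by
      cases cs with
      | nil => rfl
      | cons c r => simp at hlen
    subst this
    simp [pvGoA, pvSplit, pvLoop, pvJoin_flat]
  | succ N ih =>
    intro cs hlen out m k
    cases cs with
    | nil => simp [pvGoA, pvSplit, pvLoop, pvJoin_flat]
    | cons c rest =>
      by_cases hc : c = '`'
      · subst hc
        by_cases hmem : '`' ∈ rest
        · -- rest = name ++ '`' :: rest2 with name backtick-free
          have hdw : rest.dropWhile (fun x => x ≠ '`') ≠ [] := by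
            rw [Ne, List.dropWhile_eq_nil_iff]
            intro hall
            exact absurd (hall '`' hmem) (by simp)
          obtain ⟨d, t, hdt⟩ := List.exists_cons_of_ne_nil hdw
          have hd : d = '`' := pvDropWhile_head rest d t hdt
          set name := rest.takeWhile (fun x => x ≠ '`') with hname_def
          set rest2 := t with hrest2_def
          have hdecomp : rest = name ++ '`' :: rest2 := by
            conv_lhs => rw [← List.takeWhile_append_dropWhile (p := fun x => x ≠ '`') (l := rest)]
            rw [hdt, hd]
          have hfree : '`' ∉ name := by
            intro hx
            have := List.mem_takeWhile_imp hx
            simp at this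
          have hfind : PySem.Chars.find rest ['`'] = (name.length : Int) := by
            rw [hdecomp]; exact pvFind_char name rest2 hfree
          have htake : rest.take name.length = name := by
            rw [hdecomp, List.take_left]
          have hdrop : rest.drop (name.length + 1) = rest2 := by
            rw [hdecomp, show name ++ '`' :: rest2 = (name ++ ['`']) ++ rest2 by simp,
                show name.length + 1 = (name ++ ['`']).length by simp, List.drop_left]
          have hsplit_rest : pvSplit rest = name :: pvSplit rest2 := by
            rw [hdecomp]; exact pvSplit_append_tick name rest2 hfree
          have hsplit_cs : pvSplit ('`' :: rest) = [] :: name :: pvSplit rest2 := by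
            rw [pvSplit, if_pos rfl, hsplit_rest]
          rcases h2 : pvSplit rest2 with _ | ⟨h2h, h2t⟩
          · exact absurd h2 (pvSplit_ne_nil rest2)
          by_cases hempty : name = []
          · -- empty backticked name: both sides fail
            rw [pvGoA]
            simp only [if_neg (by simp : ¬('`' ≠ '`'))]
            rw [hfind]
            rw [if_neg (by rw [hempty]; decide : ¬((name.length : Int) = -1))]
            rw [show (name.length : Int).toNat = name.length by omega, htake,
                if_pos hempty]
            rw [hsplit_cs, h2]
            simp [pvLoop, hempty]
          · -- a real replacement step
            rw [pvGoA]
            simp only [if_neg (by simp : ¬('`' ≠ '`'))]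
            rw [hfind]
            rw [if_neg (by
              intro hbad
              have : (0:Int) ≤ (name.length : Int) := by positivity
              omega)]
            rw [show (name.length : Int).toNat = name.length by omega, htake,
                if_neg hempty, hdrop]
            have hlen2 : rest2.length ≤ N := by
              have := congrArg List.length hdecomp
              simp at this
              simp at hlen
              omega
            rw [ih rest2 hlen2]
            rw [hsplit_cs, h2]
            simp only [List.headD_cons, List.tail_cons, List.map_cons]
            rw [show pvLoop (String.ofList name :: String.ofList h2h :: List.map String.ofList h2t)
                  (out ++ [String.ofList []]) m k
                = pvLoop (List.map String.ofList h2t)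
                    ((out ++ [String.ofList []]) ++
                      ["__c" ++ PySem.Int.toStr k ++ "__", String.ofList h2h])
                    (m.insert ("__c" ++ PySem.Int.toStr k ++ "__") (String.ofList name))
                    (k + 1) by
              rw [pvLoop]
              rw [if_neg (by rw [pvOfList_eq_empty_iff]; exact hempty)]]
            rw [show (out ++ ["__c" ++ PySem.Int.toStr k ++ "__"]) ++ [String.ofList h2h]
                  = (out ++ ["__c" ++ PySem.Int.toStr k ++ "__", String.ofList h2h]) ++ [] by simp,
                pvLoop_append]
            rw [show (out ++ [String.ofList []]) ++
                    ["__c" ++ PySem.Int.toStr k ++ "__", String.ofList h2h]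
                  = (out ++ [String.ofList [], "__c" ++ PySem.Int.toStr k ++ "__",
                      String.ofList h2h]) ++ [] by simp,
                pvLoop_append]
            cases hres : pvLoop (List.map String.ofList h2t) []
                (m.insert ("__c" ++ PySem.Int.toStr k ++ "__") (String.ofList name)) (k + 1) with
            | none => simp
            | some pr =>
              simp only [Option.map_some]
              congr 1
              refine Prod.ext ?_ rfl
              rw [pvJoin_flat, pvJoin_flat]
              simp
        · -- unclosed backtick: both sides fail
          rw [pvGoA]
          simp only [if_neg (by simp : ¬('`' ≠ '`'))]
          rw [pvFind_no_tick rest hmem, if_pos rfl]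
          rw [show pvSplit ('`' :: rest) = [] :: [rest] by
                rw [pvSplit, if_pos rfl, pvSplit_no_tick rest hmem]]
          simp [pvLoop]
      · -- ordinary character
        rw [pvGoA, if_pos hc]
        have hlen' : rest.length ≤ N := by simp at hlen; omega
        rw [ih rest hlen']
        rcases h : pvSplit rest with _ | ⟨hd, tl⟩
        · exact absurd h (pvSplit_ne_nil rest)
        have hsplit_cs : pvSplit (c :: rest) = (c :: hd) :: tl := by
          rw [pvSplit, if_neg hc, h]
        rw [hsplit_cs]
        simp only [List.headD_cons, List.tail_cons]
        rw [show (out ++ [String.ofList [c]]) ++ [String.ofList hd]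
              = (out ++ [String.ofList [c], String.ofList hd]) ++ [] by simp,
            pvLoop_append]
        rw [show out ++ [String.ofList (c :: hd)]
              = (out ++ [String.ofList (c :: hd)]) ++ [] by simp,
            pvLoop_append]
        cases hres : pvLoop (List.map String.ofList tl) [] m k with
        | none => simp
        | some pr =>
          simp only [Option.map_some]
          congr 1
          refine Prod.ext ?_ rfl
          rw [pvJoin_flat, pvJoin_flat]
          simp

theorem pvMain (cs : List Char) (out : List String) (m : PySem.Dict String String) (k : Int) :
    pvGoA cs out m k =
      (pvLoop ((pvSplit cs).tail.map String.ofList)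
          (out ++ [String.ofList ((pvSplit cs).headD [])]) m k).map
        (fun pr => (PySem.Str.join "" pr.1, pr.2.items)) :=
  pvMainAux cs.length cs le_rfl out m k

-- ===== VERDICT (by name: the statement is the Claim_ definition above) =====
theorem replace_backticked_names_py_spec : Claim_equal_replace_backticked_names_py := by
  intro expr _ hpre
  obtain ⟨hodd, -⟩ := hpre
  rw [pvSplitOn_eq] at hodd
  unfold Spec_replace_backticked_names_py
  unfold replace_backticked_names_py replace_backticked_names_py_alt
  rw [pvMain, pvSplitOn_eq]
  rcases h : pvSplit expr.toList with _ | ⟨hd, tl⟩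
  · exact absurd h (pvSplit_ne_nil expr.toList)
  simp only [List.map_cons, List.headD_cons, List.tail_cons, List.nil_append,
    List.length_cons, List.length_map, List.headD_cons]
  rw [h] at hodd
  simp only [List.length_cons] at hodd
  rw [if_neg (by simp; omega)]
  cases hres : pvLoop (List.map String.ofList tl) [String.ofList hd] PySem.Dict.empty 0 with
  | none => simp
  | some pr => simp
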